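-- pv_equiv track=rewrite | github.com/dtsai720/leetcode-python | src/get_equal_substrings_within_budget.py | get_equal_substrings_within_budget
-- ===== SOURCE A (Python) =====
-- def get_equal_substrings_within_budget(s: str, t: str, max_cost: int) -> int:
--     """
--     Find the maximum length of a substring that can be made equal by changing characters
--     within a given budget.
--
--     Args:
--         s (str): The first string.
--         t (str): The second string.
--         max_cost (int): The maximum cost of changing characters.
--
--     Returns:
--         int: The maximum length of a substring that can be made equal.
--     """
--     if (
--         not isinstance(s, str)
--         or not isinstance(t, str)
--         or not isinstance(max_cost, int)
--     ):
--         raise TypeError("s and t should be strings and max_cost should be an integer")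
--
--     if len(s) != len(t):
--         raise ValueError("s and t should be of the same length")
--
--     max_length = 0
--     slow = -1
--     for fast, char in enumerate(s):
--         max_cost -= abs(ord(char) - ord(t[fast]))
--         while max_cost < 0:
--             slow += 1
--             max_cost += abs(ord(s[slow]) - ord(t[slow]))
--         max_length = max(max_length, fast - slow)
--
--     return max_length
-- ===== SOURCE B (Python) =====
-- def get_equal_substrings_within_budget(s: str, t: str, max_cost: int) -> int:
--     """Prefix sums + binary search for the minimal feasible window start at each end."""
--     if (
--         not isinstance(s, str)
--         or not isinstance(t, str)
--         or not isinstance(max_cost, int)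
--     ):
--         raise TypeError("s and t should be strings and max_cost should be an integer")
--
--     if len(s) != len(t):
--         raise ValueError("s and t should be of the same length")
--
--     n = len(s)
--     prefix = [0] * (n + 1)
--     for i in range(n):
--         prefix[i + 1] = prefix[i] + abs(ord(s[i]) - ord(t[i]))
--
--     best = 0
--     for e in range(n):
--         target = prefix[e + 1] - max_cost
--         lo, hi = 0, e + 1
--         while lo < hi:
--             mid = (lo + hi) // 2
--             if prefix[mid] >= target:
--                 hi = mid
--             else:
--                 lo = mid + 1
--         best = max(best, e + 1 - lo)
--     return best
-- ===== Notes on version B (the rewrite author's own statement) =====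
-- stated objective: alternative
-- what changed: Replaces A's stateful two-pointer sliding window by a prefix-sum array with an independent binary search for the minimal feasible window start at each end index.
import Mathlib
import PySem

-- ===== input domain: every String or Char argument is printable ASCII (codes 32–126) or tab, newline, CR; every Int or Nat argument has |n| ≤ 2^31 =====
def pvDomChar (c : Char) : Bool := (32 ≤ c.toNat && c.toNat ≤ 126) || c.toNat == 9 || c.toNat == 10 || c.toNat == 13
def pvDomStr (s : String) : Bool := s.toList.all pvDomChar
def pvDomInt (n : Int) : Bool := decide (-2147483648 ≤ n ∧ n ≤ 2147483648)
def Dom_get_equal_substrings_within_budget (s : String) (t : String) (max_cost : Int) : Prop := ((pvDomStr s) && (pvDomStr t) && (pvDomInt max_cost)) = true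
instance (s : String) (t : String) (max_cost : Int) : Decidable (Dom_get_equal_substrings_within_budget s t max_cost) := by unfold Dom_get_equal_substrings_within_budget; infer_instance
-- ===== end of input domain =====

-- B replaces A's stateful two-pointer sliding window by a prefix-sum array with a per-end
-- binary search for the minimal feasible window start (objective: alternative algorithm).

-- ===== PORT A =====
-- |ord(s[i]) - ord(t[i])| ; total form of the indexing, in range on every admitted input
def pvCost (sL tL : List Char) (i : Int) : Int :=
  |((PySem.List.pyGetD sL i ' ').toNat : Int) - ((PySem.List.pyGetD tL i ' ').toNat : Int)|

-- A's inner `while max_cost < 0: slow += 1; max_cost += ...`; fuel bounds the iterations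
-- (length+1 always suffices on inputs satisfying Pre_)
def pvWhileA (sL tL : List Char) : Nat → Int → Int → Int × Int
  | 0, slow, mc => (slow, mc)
  | fuel + 1, slow, mc =>
    if mc < 0 then
      pvWhileA sL tL fuel (slow + 1) (mc + pvCost sL tL (slow + 1))
    else (slow, mc)

def get_equal_substrings_within_budget (s : String) (t : String) (max_cost : Int) : Int :=
  let sL := s.toList
  let tL := t.toList
  if sL.length = tL.length then
    ((PySem.List.enumerate sL 0).foldl
      (fun (st : Int × Int × Int) p =>
        let mc := st.2.2 - |((p.2.toNat : Int)) - ((PySem.List.pyGetD tL p.1 ' ').toNat : Int)|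
        let sw := pvWhileA sL tL (sL.length + 1) st.2.1 mc
        (max st.1 (p.1 - sw.1), sw.1, sw.2))
      (0, -1, max_cost)).1
  else 0  -- Python raises ValueError here; excluded by Pre_

-- ===== PORT B =====
-- prefix[i] of B's python: prefix[i+1] = prefix[i] + abs(ord(s[i]) - ord(t[i]))
def pvPrefix (sL tL : List Char) : Nat → Int
  | 0 => 0
  | i + 1 => pvPrefix sL tL i + pvCost sL tL (i : Int)

-- B's `while lo < hi` binary search; (lo+hi)/2 on Nat is Python's (lo+hi)//2 on these
-- nonnegatives; the fuel hi-lo bounds the iterations (each step strictly shrinks hi-lo)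
def pvBisectAux (sL tL : List Char) (target : Int) : Nat → Nat → Nat → Nat
  | 0, lo, _ => lo
  | fuel + 1, lo, hi =>
    if lo < hi then
      -- mid = (lo + hi) // 2
      if target ≤ pvPrefix sL tL ((lo + hi) / 2) then pvBisectAux sL tL target fuel lo ((lo + hi) / 2)
      else pvBisectAux sL tL target fuel ((lo + hi) / 2 + 1) hi
    else lo

def pvBisect (sL tL : List Char) (target : Int) (lo hi : Nat) : Nat :=
  pvBisectAux sL tL target (hi - lo) lo hi

def get_equal_substrings_within_budget_alt (s : String) (t : String) (max_cost : Int) : Int :=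
  let sL := s.toList
  let tL := t.toList
  if sL.length = tL.length then
    (List.range sL.length).foldl
      (fun best (e : Nat) =>
        let lo := pvBisect sL tL (pvPrefix sL tL (e + 1) - max_cost) 0 (e + 1)
        max best ((e : Int) + 1 - (lo : Int)))
      0
  else 0  -- Python raises ValueError here; excluded by Pre_

-- ===== PRECONDITION & SPEC =====
-- Pre_ excludes only inputs where A raises: unequal lengths (ValueError), and a negative
-- budget with a non-empty string (IndexError: the slow pointer runs past the end).
def Pre_get_equal_substrings_within_budget (s : String) (t : String) (max_cost : Int) : Prop :=
  s.toList.length = t.toList.length ∧ (0 ≤ max_cost ∨ s = "")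
instance (s : String) (t : String) (max_cost : Int) : Decidable (Pre_get_equal_substrings_within_budget s t max_cost) := by unfold Pre_get_equal_substrings_within_budget; infer_instance

def pvWitness_get_equal_substrings_within_budget : String × String × Int := ("abc", "bad", 2)

def Spec_get_equal_substrings_within_budget (s : String) (t : String) (max_cost : Int) (out : Int) : Prop := out = get_equal_substrings_within_budget_alt s t max_cost
instance (s : String) (t : String) (max_cost : Int) (out : Int) : Decidable (Spec_get_equal_substrings_within_budget s t max_cost out) := by unfold Spec_get_equal_substrings_within_budget; infer_instance

-- ===== CLAIM (what is proved, stated in full; the proofs are below) =====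
def Claim_equal_get_equal_substrings_within_budget : Prop := ∀ (s : String) (t : String) (max_cost : Int), Dom_get_equal_substrings_within_budget s t max_cost → Pre_get_equal_substrings_within_budget s t max_cost → Spec_get_equal_substrings_within_budget s t max_cost (get_equal_substrings_within_budget s t max_cost)


-- ===== LEMMAS AND PROOFS =====

theorem pvCost_nonneg (sL tL : List Char) (i : Int) : 0 ≤ pvCost sL tL i := abs_nonneg _

theorem pvPrefix_mono (sL tL : List Char) {b b' : Nat} (h : b ≤ b') :
    pvPrefix sL tL b ≤ pvPrefix sL tL b' := by
  induction b' with
  | zero => rw [Nat.le_zero.mp h]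
  | succ n ih =>
    by_cases hb : b ≤ n
    · have := ih hb
      have hc := pvCost_nonneg sL tL (n : Int)
      simp only [pvPrefix]
      omega
    · have hbe : b = n + 1 := by omega
      rw [hbe]

-- the least feasible window start for windows ending at index k-1 (M 0 = 0 is the initial state)
def pvM (sL tL : List Char) (mc : Int) (hmc : 0 ≤ mc) : Nat → Nat
  | 0 => 0
  | k + 1 => Nat.find (p := fun b => pvPrefix sL tL (k + 1) - mc ≤ pvPrefix sL tL b)
      ⟨k + 1, by omega⟩

theorem pvM_le (sL tL : List Char) (mc : Int) (hmc : 0 ≤ mc) (k : Nat) :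
    pvM sL tL mc hmc k ≤ k := by
  cases k with
  | zero => exact le_refl 0
  | succ j => exact Nat.find_le (by omega)

theorem pvM_spec (sL tL : List Char) (mc : Int) (hmc : 0 ≤ mc) (k : Nat) :
    pvPrefix sL tL k - mc ≤ pvPrefix sL tL (pvM sL tL mc hmc k) := by
  cases k with
  | zero => simp only [pvM]; omega
  | succ j => exact Nat.find_spec (p := fun b => pvPrefix sL tL (j + 1) - mc ≤ pvPrefix sL tL b) _

theorem pvM_min (sL tL : List Char) (mc : Int) (hmc : 0 ≤ mc) (k : Nat) :
    ∀ b, b < pvM sL tL mc hmc (k + 1) → ¬ (pvPrefix sL tL (k + 1) - mc ≤ pvPrefix sL tL b) := by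
  intro b hb
  exact Nat.find_min _ hb

theorem pvM_mono (sL tL : List Char) (mc : Int) (hmc : 0 ≤ mc) (k : Nat) :
    pvM sL tL mc hmc k ≤ pvM sL tL mc hmc (k + 1) := by
  cases k with
  | zero => exact Nat.zero_le _
  | succ j =>
    apply Nat.find_mono
    intro b hb
    have := pvPrefix_mono sL tL (Nat.le_succ (j + 1))
    simp only [Nat.succ_eq_add_one] at this
    omega

theorem pvWhileA_eq (sL tL : List Char) (mc : Int) (e : Nat) :
    ∀ (fuel b m : Nat), b ≤ m → m ≤ fuel + b →
    pvPrefix sL tL (e + 1) - mc ≤ pvPrefix sL tL m →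
    (∀ b', b' < m → ¬ (pvPrefix sL tL (e + 1) - mc ≤ pvPrefix sL tL b')) →
    pvWhileA sL tL fuel ((b : Int) - 1) (mc - (pvPrefix sL tL (e + 1) - pvPrefix sL tL b))
      = ((m : Int) - 1, mc - (pvPrefix sL tL (e + 1) - pvPrefix sL tL m)) := by
  intro fuel
  induction fuel with
  | zero =>
    intro b m h1 h2 h3 h4
    have hbm : b = m := by omega
    subst hbm
    rfl
  | succ f ih =>
    intro b m h1 h2 h3 h4
    simp only [pvWhileA]
    by_cases hneg : mc - (pvPrefix sL tL (e + 1) - pvPrefix sL tL b) < 0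
    · have hbm : b < m := by
        rcases Nat.lt_or_ge b m with h | h
        · exact h
        · exfalso
          have := pvPrefix_mono sL tL h
          omega
      rw [if_pos hneg]
      have e1 : (b : Int) - 1 + 1 = (b : Int) := by ring
      rw [e1]
      have hstep : pvPrefix sL tL (b + 1) = pvPrefix sL tL b + pvCost sL tL (b : Int) := rfl
      have e2 : mc - (pvPrefix sL tL (e + 1) - pvPrefix sL tL b) + pvCost sL tL (b : Int)
          = mc - (pvPrefix sL tL (e + 1) - pvPrefix sL tL (b + 1)) := by omega
      rw [e2]
      have e3 : (b : Int) = ((b + 1 : Nat) : Int) - 1 := by push_cast; ring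
      rw [e3]
      exact ih (b + 1) m hbm (by omega) h3 h4
    · rw [if_neg hneg]
      have hmb : m ≤ b := by
        by_contra hc
        rw [not_le] at hc
        exact (h4 b hc) (by omega)
      have hbm : b = m := by omega
      subst hbm
      rfl

theorem pvBisectAux_least (sL tL : List Char) (tgt : Int) :
    ∀ (fuel lo hi : Nat), hi - lo ≤ fuel → lo ≤ hi →
    (∀ b, b < lo → ¬ tgt ≤ pvPrefix sL tL b) → tgt ≤ pvPrefix sL tL hi →
    tgt ≤ pvPrefix sL tL (pvBisectAux sL tL tgt fuel lo hi) ∧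
    (∀ b, b < pvBisectAux sL tL tgt fuel lo hi → ¬ tgt ≤ pvPrefix sL tL b) := by
  intro fuel
  induction fuel with
  | zero =>
    intro lo hi h1 h2 h3 h4
    have : lo = hi := by omega
    subst this
    exact ⟨h4, h3⟩
  | succ f ih =>
    intro lo hi h1 h2 h3 h4
    simp only [pvBisectAux]
    by_cases hlt : lo < hi
    · rw [if_pos hlt]
      by_cases hm : tgt ≤ pvPrefix sL tL ((lo + hi) / 2)
      · rw [if_pos hm]
        exact ih lo ((lo + hi) / 2) (by omega) (by omega) h3 hm
      · rw [if_neg hm]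
        refine ih ((lo + hi) / 2 + 1) hi (by omega) (by omega) ?_ h4
        intro b hb
        by_cases hbl : b < lo
        · exact h3 b hbl
        · intro hp
          exact hm (le_trans hp (pvPrefix_mono sL tL (by omega)))
    · rw [if_neg hlt]
      have : lo = hi := by omega
      subst this
      exact ⟨h4, h3⟩

theorem pvBisect_eq_pvM (sL tL : List Char) (mc : Int) (hmc : 0 ≤ mc) (e : Nat) :
    pvBisect sL tL (pvPrefix sL tL (e + 1) - mc) 0 (e + 1) = pvM sL tL mc hmc (e + 1) := by
  obtain ⟨hp, hmin⟩ := pvBisectAux_least sL tL (pvPrefix sL tL (e + 1) - mc)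
    (e + 1 - 0) 0 (e + 1) (le_refl _) (Nat.zero_le _)
    (fun b hb => absurd hb (Nat.not_lt_zero b)) (by omega)
  symm
  exact (Nat.find_eq_iff _).mpr ⟨hp, fun b hb => hmin b hb⟩

theorem pvCostA_eq (sL tL : List Char) (k : Nat) (hk : k < sL.length) :
    |((sL[k].toNat : Int)) - ((PySem.List.pyGetD tL (k : Int) ' ').toNat : Int)|
      = pvCost sL tL (k : Int) := by
  simp only [pvCost, PySem.List.pyGetD_natCast, List.getD_eq_getElem?_getD]
  rw [List.getElem?_eq_getElem hk]
  rfl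

theorem foldA (sL tL : List Char) (mc : Int) (hmc : 0 ≤ mc) :
    ∀ k, k ≤ sL.length →
    ((PySem.List.enumerate sL 0).take k).foldl
      (fun (st : Int × Int × Int) p =>
        (max st.1 (p.1 - (pvWhileA sL tL (sL.length + 1) st.2.1
            (st.2.2 - |((p.2.toNat : Int)) - ((PySem.List.pyGetD tL p.1 ' ').toNat : Int)|)).1),
         (pvWhileA sL tL (sL.length + 1) st.2.1
            (st.2.2 - |((p.2.toNat : Int)) - ((PySem.List.pyGetD tL p.1 ' ').toNat : Int)|)).1,
         (pvWhileA sL tL (sL.length + 1) st.2.1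
            (st.2.2 - |((p.2.toNat : Int)) - ((PySem.List.pyGetD tL p.1 ' ').toNat : Int)|)).2))
      (0, -1, mc)
    = ((List.range k).foldl
         (fun acc (e : Nat) => max acc ((e : Int) + 1 - (pvM sL tL mc hmc (e + 1) : Int))) 0,
       (pvM sL tL mc hmc k : Int) - 1,
       mc - (pvPrefix sL tL k - pvPrefix sL tL (pvM sL tL mc hmc k))) := by
  intro k
  induction k with
  | zero =>
    intro _
    simp [pvM, pvPrefix]
  | succ k ih =>
    intro hk1
    have hk : k < sL.length := by omega
    rw [List.take_add_one, List.foldl_append, ih (le_of_lt hk)]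
    have hEk : (PySem.List.enumerate sL 0)[k]? = some ((k : Int), sL[k]) := by
      rw [PySem.List.getElem?_enumerate, List.getElem?_eq_getElem hk]
      simp
    rw [hEk]
    simp only [Option.toList_some, List.foldl_cons, List.foldl_nil]
    rw [pvCostA_eq sL tL k hk]
    have hstep : pvPrefix sL tL (k + 1) = pvPrefix sL tL k + pvCost sL tL (k : Int) := rfl
    have e2 : mc - (pvPrefix sL tL k - pvPrefix sL tL (pvM sL tL mc hmc k)) - pvCost sL tL (k : Int)
        = mc - (pvPrefix sL tL (k + 1) - pvPrefix sL tL (pvM sL tL mc hmc k)) := by omega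
    rw [e2]
    rw [pvWhileA_eq sL tL mc k (sL.length + 1) (pvM sL tL mc hmc k) (pvM sL tL mc hmc (k + 1))
      (pvM_mono sL tL mc hmc k)
      (by have := pvM_le sL tL mc hmc (k + 1); omega)
      (pvM_spec sL tL mc hmc (k + 1))
      (pvM_min sL tL mc hmc k)]
    rw [List.range_succ, List.foldl_append, List.foldl_cons, List.foldl_nil]
    have e4 : (k : Int) - ((pvM sL tL mc hmc (k + 1) : Int) - 1)
        = (k : Int) + 1 - (pvM sL tL mc hmc (k + 1) : Int) := by ring
    rw [e4]

theorem foldB (sL tL : List Char) (mc : Int) (hmc : 0 ≤ mc) :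
    ∀ k,
    (List.range k).foldl
      (fun best (e : Nat) =>
        max best ((e : Int) + 1 - ((pvBisect sL tL (pvPrefix sL tL (e + 1) - mc) 0 (e + 1)) : Int))) 0
    = (List.range k).foldl
      (fun acc (e : Nat) => max acc ((e : Int) + 1 - (pvM sL tL mc hmc (e + 1) : Int))) 0 := by
  intro k
  induction k with
  | zero => rfl
  | succ k ih =>
    rw [List.range_succ, List.foldl_append, List.foldl_append,
      List.foldl_cons, List.foldl_nil, List.foldl_cons, List.foldl_nil, ih,
      pvBisect_eq_pvM sL tL mc hmc k]

-- ===== VERDICT (by name: the statement is the Claim_ definition above) =====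
theorem get_equal_substrings_within_budget_spec : Claim_equal_get_equal_substrings_within_budget := by
  intro s t mc _ hpre
  rcases hpre with ⟨hlen, hc⟩
  unfold Spec_get_equal_substrings_within_budget
  simp only [get_equal_substrings_within_budget, get_equal_substrings_within_budget_alt]
  rw [if_pos hlen, if_pos hlen]
  rcases hc with hmc | hs
  · rw [foldB s.toList t.toList mc hmc s.toList.length]
    have hE : PySem.List.enumerate s.toList 0
        = (PySem.List.enumerate s.toList 0).take s.toList.length := by
      rw [← PySem.List.length_enumerate (xs := s.toList) (s := 0), List.take_length]
    rw [hE, foldA s.toList t.toList mc hmc s.toList.length (le_refl _)]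
  · subst hs
    rfl
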